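-- pv_equiv track=rewrite | github.com/gkska741/Studies | Algorithm/일간공부기록/0810/4831_전기버스.py | can_charge
-- ===== SOURCE A (Python) =====
-- def can_charge(lst, k):
--     temp = []
--     for i in range(len(lst)):
--         if lst[i] == '1':
--             temp.append(i)
--         else:
--             pass
--     for j in range(len(temp)-1):
--         if temp[j+1] - temp[j] > k:
--             return False
--     return True
-- ===== SOURCE B (Python) =====
-- def can_charge(lst, k):
--     last = None
--     for i in range(len(lst)):
--         if lst[i] == '1':
--             if last is not None and i - last > k:
--                 return False
--             last = i
--     return True
-- ===== Notes on version B (the rewrite author's own statement) =====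
-- stated objective: simpler
-- what changed: Single pass keeping only the last seen station index as scalar state, instead of building the full index list and then scanning consecutive gaps in a second loop.
import Mathlib
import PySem

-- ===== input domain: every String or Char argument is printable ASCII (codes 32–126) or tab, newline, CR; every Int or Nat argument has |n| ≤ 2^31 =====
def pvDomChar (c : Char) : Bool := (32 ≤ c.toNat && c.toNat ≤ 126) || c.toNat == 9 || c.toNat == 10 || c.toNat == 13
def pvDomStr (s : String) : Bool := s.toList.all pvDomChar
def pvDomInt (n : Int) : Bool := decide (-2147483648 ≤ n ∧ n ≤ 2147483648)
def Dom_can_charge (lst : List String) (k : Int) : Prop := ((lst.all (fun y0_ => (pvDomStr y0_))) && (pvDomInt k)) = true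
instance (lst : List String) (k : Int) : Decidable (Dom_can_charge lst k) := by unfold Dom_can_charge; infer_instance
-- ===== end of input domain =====

-- B: one pass keeping only the last seen station index (scalar state) instead of
-- building the full index list and then scanning consecutive gaps (objective: simpler).
-- ===== PORT A =====
-- second loop of A: walk consecutive pairs temp[j], temp[j+1]
def pairsLoop : List Int → Int → Bool
  | a :: b :: rest, k => if b - a > k then false else pairsLoop (b :: rest) k
  | _, _ => true

def can_charge (lst : List String) (k : Int) : Bool :=
  let temp := (List.range lst.length).foldl
    (fun acc i => if lst.getD i "" == "1" then acc ++ [(i : Int)] else acc) []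
  pairsLoop temp k

-- ===== PORT B =====
-- B's loop: index i and last-seen station index carried as state
def altLoop : List String → Int → Int → Option Int → Bool
  | [], _, _, _ => true
  | s :: rest, k, i, last =>
    if s == "1" then
      match last with
      | some l => if i - l > k then false else altLoop rest k (i + 1) (some i)
      | none => altLoop rest k (i + 1) (some i)
    else altLoop rest k (i + 1) last

def can_charge_alt (lst : List String) (k : Int) : Bool := altLoop lst k 0 none

-- ===== PRECONDITION & SPEC =====
def Spec_can_charge (lst : List String) (k : Int) (out : Bool) : Prop := out = can_charge_alt lst k
instance (lst : List String) (k : Int) (out : Bool) : Decidable (Spec_can_charge lst k out) := by unfold Spec_can_charge; infer_instance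

-- ===== CLAIM (what is proved, stated in full; the proofs are below) =====
def Claim_equal_can_charge : Prop := ∀ (lst : List String) (k : Int), Dom_can_charge lst k → Spec_can_charge lst k (can_charge lst k)

-- ===== LEMMAS AND PROOFS =====

-- ===== VERDICT (by name: the statement is the Claim_ definition above) =====
-- the station indices of lst, starting the count at c
def indicesFrom : List String → Int → List Int
  | [], _ => []
  | s :: rest, c =>
    if s == "1" then c :: indicesFrom rest (c + 1) else indicesFrom rest (c + 1)

theorem foldl_app_filterMap (l : List Nat) (f : List String) (acc : List Int) (c : Int) :
    l.foldl (fun a i => if f.getD i "" == "1" then a ++ [(i : Int) + c] else a) acc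
      = acc ++ l.filterMap (fun i => if f.getD i "" == "1" then some ((i : Int) + c) else none) := by
  induction l generalizing acc with
  | nil => simp
  | cons x xs ih =>
    cases hb : f.getD x "" == "1" <;>
      simp only [List.foldl_cons, List.filterMap_cons, hb, Bool.false_eq_true,
        if_true, if_false, reduceIte] <;> rw [ih] <;> simp

theorem range_filterMap_eq (lst : List String) (c : Int) :
    (List.range lst.length).filterMap
        (fun i => if lst.getD i "" == "1" then some ((i : Int) + c) else none)
      = indicesFrom lst c := by
  induction lst generalizing c with
  | nil => simp [indicesFrom]
  | cons s rest ih =>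
    rw [List.length_cons, List.range_succ_eq_map]
    simp only [List.filterMap_cons, List.filterMap_map, indicesFrom]
    by_cases h : s == "1" <;>
      simp [h, ← ih (c + 1)] <;>
      congr 1 <;> funext i <;> ring_nf

theorem temp_eq (lst : List String) :
    (List.range lst.length).foldl
        (fun acc i => if lst.getD i "" == "1" then acc ++ [(i : Int)] else acc) []
      = indicesFrom lst 0 := by
  have h := foldl_app_filterMap (List.range lst.length) lst [] 0
  have h2 := range_filterMap_eq lst 0
  simp only [Int.add_zero] at h h2
  rw [h, List.nil_append, h2]

theorem altLoop_eq (lst : List String) (k : Int) :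
    ∀ (i : Int) (last : Option Int),
      altLoop lst k i last = pairsLoop (last.toList ++ indicesFrom lst i) k := by
  induction lst with
  | nil => intro i last; cases last <;> simp [altLoop, indicesFrom, pairsLoop]
  | cons s rest ih =>
    intro i last
    by_cases h : s == "1"
    · cases last with
      | none => simp [altLoop, indicesFrom, h, ih]
      | some l =>
        simp only [altLoop, indicesFrom, h, if_true, Option.toList]
        by_cases hk : i - l > k <;> simp [pairsLoop, hk, ih]
    · cases last <;> simp [altLoop, indicesFrom, h, ih]

theorem can_charge_spec : Claim_equal_can_charge := by
  intro lst k _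
  unfold Spec_can_charge can_charge can_charge_alt
  rw [temp_eq, altLoop_eq]
  rfl
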